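-- pv_equiv track=rewrite | github.com/valkanoise/Programacion-en-python-UNSAM | Exercises/Clase06/Ejercicio 6.13.py | busqueda_lineal_lordenada
-- ===== SOURCE A (Python) =====
-- def busqueda_lineal_lordenada(lista,e):
--     '''Si e está en la lista devuelve su posición, de lo
--     contrario devuelve -1.
--     Esta función ordena la lista y es más eficiente, porque si encuentra
--     un elemento > a e deja de seguir buscando
--     '''
--     lista.sort()
--     pos = -1  # comenzamos suponiendo que e no está
--     for i, z in enumerate(lista): # recorremos la lista
--
--         if z > e:
--             break
--
--         if z == e:   # si encontramos a e
--             pos = i  # guardamos su posición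
--             break    # y salimos del ciclo
--
--     return pos
-- ===== SOURCE B (Python) =====
-- def busqueda_lineal_lordenada(lista, e):
--     '''Sorts the list in place, then binary-searches for the first
--     occurrence of e; returns its index or -1.'''
--     lista.sort()
--     lo, hi = 0, len(lista)
--     while lo < hi:
--         mid = (lo + hi) // 2
--         if lista[mid] < e:
--             lo = mid + 1
--         else:
--             hi = mid
--     if lo < len(lista) and lista[lo] == e:
--         return lo
--     return -1
-- ===== Notes on version B (the rewrite author's own statement) =====
-- stated objective: alternative
-- what changed: Replaces the early-stopping linear scan over the sorted list with a hand-written binary search (bisect_left style) for the first occurrence of e; the in-place sort dominates the cost, so overall runtime is comparable.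
import Mathlib
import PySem

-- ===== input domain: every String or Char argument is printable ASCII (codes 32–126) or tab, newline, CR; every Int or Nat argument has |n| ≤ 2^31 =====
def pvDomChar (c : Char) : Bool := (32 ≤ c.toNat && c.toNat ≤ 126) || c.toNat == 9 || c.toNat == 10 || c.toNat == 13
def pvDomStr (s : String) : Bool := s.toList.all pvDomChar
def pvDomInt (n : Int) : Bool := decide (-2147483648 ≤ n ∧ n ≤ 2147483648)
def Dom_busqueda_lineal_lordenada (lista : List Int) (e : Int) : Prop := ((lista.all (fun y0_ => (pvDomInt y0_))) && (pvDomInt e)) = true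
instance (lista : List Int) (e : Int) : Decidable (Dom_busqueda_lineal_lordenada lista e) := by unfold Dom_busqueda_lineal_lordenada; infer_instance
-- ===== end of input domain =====

-- B replaces A's early-stopping linear scan of the sorted list with a binary search (bisect_left style);
-- both sort the argument in place in Python (same mutation); equivalence proved on the return value.


-- ===== PORT A =====
-- A's for-loop over enumerate(sorted list) with two breaks, as structural recursion carrying the index i.
def pvScanA (e : Int) : List Int → Nat → Int
  | [], _ => -1
  | z :: rest, i => if z > e then -1 else if z = e then (i : Int) else pvScanA e rest (i + 1)

def busqueda_lineal_lordenada (lista : List Int) (e : Int) : Int :=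
  pvScanA e (PySem.List.sorted lista (fun x => x) false) 0

-- ===== PORT B =====
-- B's while-loop binary search (bisect_left): lo/hi shrink until lo = hi.
def pvBL (s : List Int) (e : Int) (lo hi : Nat) : Nat :=
  if _h : lo < hi then
    let mid := (lo + hi) / 2
    if s.getD mid 0 < e then pvBL s e (mid + 1) hi else pvBL s e lo mid
  else lo
termination_by hi - lo
decreasing_by all_goals omega

def busqueda_lineal_lordenada_alt (lista : List Int) (e : Int) : Int :=
  let s := PySem.List.sorted lista (fun x => x) false
  let lo := pvBL s e 0 s.length
  if lo < s.length ∧ s.getD lo 0 = e then (lo : Int) else -1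

-- ===== PRECONDITION & SPEC =====
def Spec_busqueda_lineal_lordenada (lista : List Int) (e : Int) (out : Int) : Prop := out = busqueda_lineal_lordenada_alt lista e
instance (lista : List Int) (e : Int) (out : Int) : Decidable (Spec_busqueda_lineal_lordenada lista e out) := by unfold Spec_busqueda_lineal_lordenada; infer_instance

-- ===== CLAIM (what is proved, stated in full; the proofs are below) =====
def Claim_equal_busqueda_lineal_lordenada : Prop := ∀ (lista : List Int) (e : Int), Dom_busqueda_lineal_lordenada lista e → Spec_busqueda_lineal_lordenada lista e (busqueda_lineal_lordenada lista e)

-- ===== LEMMAS AND PROOFS =====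

-- One unfolding step of pvBL in each branch.
theorem pvBL_step_lt (s : List Int) (e : Int) (lo hi : Nat) (h : lo < hi)
    (hlt : s.getD ((lo + hi) / 2) 0 < e) :
    pvBL s e lo hi = pvBL s e ((lo + hi) / 2 + 1) hi := by
  rw [pvBL, dif_pos h]; rw [if_pos hlt]

theorem pvBL_step_ge (s : List Int) (e : Int) (lo hi : Nat) (h : lo < hi)
    (hge : ¬ s.getD ((lo + hi) / 2) 0 < e) :
    pvBL s e lo hi = pvBL s e lo ((lo + hi) / 2) := by
  rw [pvBL, dif_pos h]; rw [if_neg hge]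

-- The binary search returns a boundary r: everything strictly below r is < e, everything from r on is ≥ e.
theorem pvBL_spec (s : List Int) (e : Int)
    (hmono : ∀ i j, i < j → j < s.length → s.getD i 0 ≤ s.getD j 0) :
    ∀ (n lo hi : Nat), hi - lo ≤ n → lo ≤ hi → hi ≤ s.length →
    (∀ k, k < lo → s.getD k 0 < e) →
    (∀ k, hi ≤ k → k < s.length → e ≤ s.getD k 0) →
    (∀ k, k < pvBL s e lo hi → s.getD k 0 < e) ∧
    (∀ k, pvBL s e lo hi ≤ k → k < s.length → e ≤ s.getD k 0) ∧
    pvBL s e lo hi ≤ s.length := by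
  intro n
  induction n with
  | zero =>
    intro lo hi hn hle hhi hlow hhigh
    have : ¬ lo < hi := by omega
    rw [pvBL, dif_neg this]
    exact ⟨fun k hk => hlow k hk, fun k hk hk' => hhigh k (by omega) hk', by omega⟩
  | succ n ih =>
    intro lo hi hn hle hhi hlow hhigh
    by_cases h : lo < hi
    · by_cases hlt : s.getD ((lo + hi) / 2) 0 < e
      · rw [pvBL_step_lt s e lo hi h hlt]
        refine ih ((lo + hi) / 2 + 1) hi (by omega) (by omega) hhi ?_ hhigh
        intro k hk
        rcases Nat.lt_or_ge k lo with hk' | hk'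
        · exact hlow k hk'
        · rcases Nat.eq_or_lt_of_le (Nat.le_of_lt_succ hk) with rfl | hk''
          · exact hlt
          · exact lt_of_le_of_lt (hmono k ((lo + hi) / 2) hk'' (by omega)) hlt
      · rw [pvBL_step_ge s e lo hi h hlt]
        refine ih lo ((lo + hi) / 2) (by omega) (by omega) (by omega) hlow ?_
        intro k hk hk'
        rcases Nat.eq_or_lt_of_le hk with rfl | hk''
        · exact le_of_not_gt hlt
        · exact le_trans (le_of_not_gt hlt) (hmono ((lo + hi) / 2) k hk'' hk')
    · rw [pvBL, dif_neg h]
      exact ⟨fun k hk => hlow k hk, fun k hk hk' => hhigh k (by omega) hk', by omega⟩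

-- A's scan, characterised by the boundary r alone (the r-conditions encode the needed order facts).
theorem pvScanA_char (e : Int) :
    ∀ (s : List Int) (i : Nat) (r : Nat), r ≤ s.length →
    (∀ k, k < r → s.getD k 0 < e) →
    (∀ k, r ≤ k → k < s.length → e ≤ s.getD k 0) →
    pvScanA e s i = (if r < s.length ∧ s.getD r 0 = e then ((i : Int) + (r : Int)) else -1) := by
  intro s
  induction s with
  | nil => intro i r hr _ _; simp [pvScanA]
  | cons z rest ih =>
    intro i r hr hlow hhigh
    by_cases hz : z > e
    · have hr0 : r = 0 := by
        by_contra hne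
        have := hlow 0 (by omega)
        simp at this; omega
      subst hr0
      have hne : ¬ (0 < (z :: rest).length ∧ (z :: rest).getD 0 0 = e) := by
        simp; omega
      simp only [pvScanA, if_pos hz]
      rw [if_neg hne]
    · by_cases hze : z = e
      · have hr0 : r = 0 := by
          by_contra hne
          have := hlow 0 (by omega)
          simp at this; omega
        subst hr0
        have hpos : 0 < (z :: rest).length ∧ (z :: rest).getD 0 0 = e := by simp [hze]
        simp only [pvScanA, if_neg hz, if_pos hze]
        rw [if_pos hpos]; omega
      · have hzlt : z < e := by omega
        have hr1 : 1 ≤ r := by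
          by_contra hne
          have := hhigh 0 (by omega) (by simp)
          simp at this; omega
        have hgd : (z :: rest).getD r 0 = rest.getD (r - 1) 0 := by
          rcases r with _ | r'
          · omega
          · simp
        have key := ih (i + 1) (r - 1) (by simp at hr; omega)
          (fun k hk => by
            have := hlow (k + 1) (by omega)
            simpa using this)
          (fun k hk hk' => by
            have := hhigh (k + 1) (by omega) (by simp; omega)
            simpa using this)
        simp only [pvScanA, if_neg hz, if_neg hze]
        rw [key]
        by_cases hcase : r - 1 < rest.length ∧ rest.getD (r - 1) 0 = e
        · rw [if_pos hcase, if_pos ⟨by simp; omega, by rw [hgd]; exact hcase.2⟩]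
          omega
        · rw [if_neg hcase, if_neg]
          intro ⟨h1, h2⟩
          exact hcase ⟨by simp at h1; omega, by rw [← hgd]; exact h2⟩

-- Sortedness of the sorted list, in getD form.
theorem sorted_getD_mono (lista : List Int) :
    ∀ i j, i < j → j < (PySem.List.sorted lista (fun x => x) false).length →
      (PySem.List.sorted lista (fun x => x) false).getD i 0 ≤ (PySem.List.sorted lista (fun x => x) false).getD j 0 := by
  intro i j hij hj
  have hp := PySem.List.sorted_pairwise (xs := lista) (key := fun x => x)
  rw [List.pairwise_iff_getElem] at hp
  have h := hp i j (by omega) hj hij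
  rw [List.getD_eq_getElem _ 0 (by omega), List.getD_eq_getElem _ 0 hj]
  exact h

-- ===== VERDICT (by name: the statement is the Claim_ definition above) =====
theorem busqueda_lineal_lordenada_spec : Claim_equal_busqueda_lineal_lordenada := by
  intro lista e _
  unfold Spec_busqueda_lineal_lordenada busqueda_lineal_lordenada busqueda_lineal_lordenada_alt
  set s := PySem.List.sorted lista (fun x => x) false with hs
  have hmono := sorted_getD_mono lista
  rw [← hs] at hmono
  obtain ⟨h1, h2, h3⟩ := pvBL_spec s e hmono s.length 0 s.length (by omega) (by omega) (le_refl _)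
    (fun k hk => by omega) (fun k hk hk' => by omega)
  have hchar := pvScanA_char e s 0 (pvBL s e 0 s.length) h3 h1 h2
  simp only [hchar]
  split_ifs with h
  · simp
  · rfl
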